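-- pv_equiv track=rewrite | github.com/SSteel2/AdventOfCode | 2015/05/5.py | _is_nice_string_gold
-- ===== SOURCE A (Python) =====
-- def _is_nice_string_gold(line):
-- 	is_repeating_letter_pair = False
-- 	is_close_same_letter = False
-- 	for i in range(len(line) - 2):
-- 		if line[i:i + 2] in line[i + 2:]:
-- 			is_repeating_letter_pair = True
-- 		if line[i] == line[i + 2]:
-- 			is_close_same_letter = True
-- 	return is_repeating_letter_pair and is_close_same_letter
-- ===== SOURCE B (Python) =====
-- def _is_nice_string_gold(line):
-- 	has_sandwich = any(a == b for a, b in zip(line, line[2:]))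
-- 	first = {}
-- 	has_pair = False
-- 	for i, p in enumerate(zip(line, line[1:])):
-- 		j = first.setdefault(p, i)
-- 		if i - j >= 2:
-- 			has_pair = True
-- 	return has_pair and has_sandwich
-- ===== Notes on version B (the rewrite author's own statement) =====
-- stated objective: faster
-- what changed: A rescans the tail for each 2-char slice (quadratic substring tests); B does a staged linear pass: the sandwich test is a zip(line, line[2:]) any, and the pair test walks enumerate(zip(line, line[1:])) keeping a dict of pair-tuple -> first index via setdefault and comparing the gap in O(1).
import Mathlib
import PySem

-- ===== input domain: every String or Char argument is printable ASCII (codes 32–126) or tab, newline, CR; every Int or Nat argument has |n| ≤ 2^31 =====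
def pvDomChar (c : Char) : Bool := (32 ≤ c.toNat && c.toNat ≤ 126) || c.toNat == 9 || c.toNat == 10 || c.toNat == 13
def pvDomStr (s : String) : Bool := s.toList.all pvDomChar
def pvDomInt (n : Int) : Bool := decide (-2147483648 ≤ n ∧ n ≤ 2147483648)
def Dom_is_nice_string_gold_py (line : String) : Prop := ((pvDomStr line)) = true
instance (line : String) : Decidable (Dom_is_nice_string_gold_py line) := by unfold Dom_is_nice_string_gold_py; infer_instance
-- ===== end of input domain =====

-- B replaces A's quadratic "slice occurs in the rest of the string" scan by a staged linear
-- pass: an any-over-zip sandwich test and a dict of pair tuple → first index (objective: faster).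

-- ===== PORT A =====
-- loop body of A: the two flag updates for one index i
def pvStepA (l : List Char) (st : Bool × Bool) (i : Int) : Bool × Bool :=
  let st := if PySem.Chars.isIn (PySem.Chars.slice l (some i) (some (i + 2)))
               (PySem.Chars.slice l (some (i + 2)) none) then (true, st.2) else st
  if PySem.List.pyGetD l i ' ' == PySem.List.pyGetD l (i + 2) ' ' then (st.1, true) else st

def is_nice_string_gold_py (line : String) : Bool :=
  let l := line.toList
  let st := (PySem.List.pyRange 0 ((l.length : Int) - 2) 1).foldl (pvStepA l) (false, false)
  st.1 && st.2

-- ===== PORT B =====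
-- any(a == b for a, b in zip(line, line[2:]))
def pvSandwichB (l : List Char) : Bool := (l.zip (l.drop 2)).any (fun ab => ab.1 == ab.2)

-- loop body of B: j = first.setdefault(p, i); if i - j >= 2: has_pair = True
def pvStepB (st : PySem.Dict (Char × Char) Int × Bool) (ip : Int × (Char × Char)) :
    PySem.Dict (Char × Char) Int × Bool :=
  let j := (st.1.get? ip.2).getD ip.1
  (st.1.setdefault ip.2 ip.1, if 2 ≤ ip.1 - j then true else st.2)

def is_nice_string_gold_py_alt (line : String) : Bool :=
  let l := line.toList
  let hs := pvSandwichB l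
  let st := (PySem.List.enumerate (l.zip (l.drop 1))).foldl pvStepB (PySem.Dict.empty, false)
  st.2 && hs

-- ===== PRECONDITION & SPEC =====
def Spec_is_nice_string_gold_py (line : String) (out : Bool) : Prop := out = is_nice_string_gold_py_alt line
instance (line : String) (out : Bool) : Decidable (Spec_is_nice_string_gold_py line out) := by unfold Spec_is_nice_string_gold_py; infer_instance

-- ===== CLAIM (what is proved, stated in full; the proofs are below) =====
def Claim_equal_is_nice_string_gold_py : Prop := ∀ (line : String), Dom_is_nice_string_gold_py line → Spec_is_nice_string_gold_py line (is_nice_string_gold_py line)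

-- ===== LEMMAS AND PROOFS =====

-- the pair of characters starting at index k, as A's slice produces it
def pvPair (l : List Char) (k : Nat) : List Char := (l.drop k).take 2
-- the same pair as B's zip produces it (tuple form; only meaningful for k + 1 < length)
def pvTP (l : List Char) (k : Nat) : Char × Char := (l.getD k ' ', l.getD (k + 1) ' ')
-- A's two per-index tests, in Nat form
def pvA1 (l : List Char) (k : Nat) : Bool := PySem.Chars.isIn (pvPair l k) (l.drop (k + 2))
def pvA2 (l : List Char) (k : Nat) : Bool := l.getD k ' ' == l.getD (k + 2) ' '
-- first index < m whose tuple pair is q (what B's dict stores)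
def pvFst (l : List Char) (m : Nat) (q : Char × Char) : Option Int :=
  ((List.range m).find? (fun k => pvTP l k == q)).map (fun k : Nat => (k : Int))
-- "a pair repeats without overlap among indices < m" (B's flag after m steps)
def pvP1 (l : List Char) (m : Nat) : Bool :=
  (List.range m).any (fun k => (List.range k).any (fun j => decide (j + 2 ≤ k) && (pvTP l j == pvTP l k)))

theorem pvP1_iff (l : List Char) (m : Nat) :
    pvP1 l m = true ↔ ∃ k < m, ∃ j < k, j + 2 ≤ k ∧ pvTP l j = pvTP l k := by
  unfold pvP1
  simp only [List.any_eq_true, List.mem_range, Bool.and_eq_true, decide_eq_true_eq, beq_iff_eq]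

theorem pvSlice_cast (l : List Char) (k : Nat) :
    PySem.Chars.slice l (some (k : Int)) (some ((k : Int) + 2)) = pvPair l k := by
  have h := PySem.List.slice_natCast_add l k 2
  simpa [pvPair, PySem.Chars.slice_eq_listSlice] using h

theorem pvStepA_cast (l : List Char) (st : Bool × Bool) (k : Nat) :
    pvStepA l st (k : Int) = (st.1 || pvA1 l k, st.2 || pvA2 l k) := by
  have h2 : ((k : Int) + 2) = ((k + 2 : Nat) : Int) := by push_cast; ring
  unfold pvStepA
  rw [pvSlice_cast, h2]
  simp only [PySem.Chars.slice_eq_listSlice, PySem.List.slice_from_natCast,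
    PySem.List.pyGetD_natCast, pvA1, pvA2]
  cases h1 : PySem.Chars.isIn (pvPair l k) (l.drop (k + 2)) <;>
    cases hb : (l.getD k ' ' == l.getD (k + 2) ' ') <;> simp_all

theorem pvFoldA (l : List Char) (m : Nat) (st : Bool × Bool) :
    ((List.range m).map (fun k : Nat => (k : Int))).foldl (pvStepA l) st =
      (st.1 || (List.range m).any (pvA1 l), st.2 || (List.range m).any (pvA2 l)) := by
  induction m generalizing st with
  | zero => simp
  | succ m ih =>
    rw [List.range_succ, List.map_append, List.foldl_append, ih]
    simp only [List.map_cons, List.map_nil, List.foldl_cons, List.foldl_nil, List.any_append,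
      List.any_cons, List.any_nil]
    rw [pvStepA_cast]
    simp [Bool.or_assoc]

-- the list B's loop walks: enumerate(zip(line, line[1:])) is the indexed tuple pairs
theorem pvZip1_eq (l : List Char) :
    l.zip (l.drop 1) = (List.range (l.length - 1)).map (pvTP l) := by
  apply List.ext_getElem
  · simp only [List.length_zip, List.length_map, List.length_range, List.length_drop]; omega
  · intro i h1 h2
    have hi : i + 1 < l.length := by
      simp [List.length_zip] at h1; omega
    simp [List.getElem_zip, pvTP]
    rw [List.getElem?_eq_getElem (Nat.lt_of_succ_lt hi), List.getElem?_eq_getElem hi]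
    exact ⟨rfl, rfl⟩

theorem pvEnum_map_range {α : Type} (f : Nat → α) (m : Nat) :
    PySem.List.enumerate ((List.range m).map f) 0 =
      (List.range m).map (fun k : Nat => ((k : Int), f k)) := by
  induction m with
  | zero => simp [PySem.List.enumerate_nil]
  | succ m ih =>
    rw [List.range_succ, List.map_append, List.map_append, PySem.List.enumerate_append, ih]
    simp [PySem.List.enumerate_cons, PySem.List.enumerate_nil]

theorem pvFind?_range_some {f : Nat → Bool} {m k : Nat}
    (h : List.find? f (List.range m) = some k) :
    k < m ∧ f k = true ∧ ∀ j < k, f j = false := by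
  induction m with
  | zero => simp [List.range_zero] at h
  | succ m ih =>
    rw [List.range_succ, List.find?_append] at h
    cases hf : List.find? f (List.range m) with
    | some k' =>
      rw [hf] at h
      simp only [Option.some_or] at h
      obtain rfl : k' = k := by injection h
      obtain ⟨h1, h2, h3⟩ := ih hf
      exact ⟨Nat.lt_succ_of_lt h1, h2, h3⟩
    | none =>
      rw [hf] at h
      simp only [Option.none_or, List.find?_singleton] at h
      have hnone := List.find?_eq_none.mp hf
      by_cases hm : f m = true
      · simp only [hm, if_true] at h
        obtain rfl : m = k := by injection h
        refine ⟨Nat.lt_succ_self _, hm, fun j hj => ?_⟩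
        have := hnone j (by simpa using hj)
        simpa using this
      · simp [hm] at h

theorem pvFst_succ (l : List Char) (m : Nat) (q : Char × Char) :
    pvFst l (m + 1) q = (pvFst l m q).or (if pvTP l m = q then some (m : Int) else none) := by
  unfold pvFst
  rw [List.range_succ, List.find?_append]
  cases hf : List.find? (fun k => pvTP l k == q) (List.range m) with
  | some k => simp
  | none =>
    by_cases hq : pvTP l m = q
    · simp [hq]
    · simp [hq]

theorem pvStepB_inv (l : List Char) (m : Nat) (d : PySem.Dict (Char × Char) Int) (b : Bool)
    (hd : ∀ q, d.get? q = pvFst l m q) (h1 : b = pvP1 l m) :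
    (∀ q, (pvStepB (d, b) ((m : Int), pvTP l m)).1.get? q = pvFst l (m + 1) q) ∧
    (pvStepB (d, b) ((m : Int), pvTP l m)).2 = pvP1 l (m + 1) := by
  cases hg : d.get? (pvTP l m) with
  | some j =>
    have hspec := hd (pvTP l m)
    rw [hg] at hspec
    obtain ⟨k0, hk0find, rfl⟩ : ∃ k0 : Nat,
        List.find? (fun k => pvTP l k == pvTP l m) (List.range m) = some k0 ∧ j = (k0 : Int) := by
      unfold pvFst at hspec
      cases hf : List.find? (fun k => pvTP l k == pvTP l m) (List.range m) with
      | none => rw [hf] at hspec; simp at hspec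
      | some k0 => rw [hf] at hspec; simp at hspec; exact ⟨k0, rfl, hspec⟩
    obtain ⟨hk0m, hk0p, hk0min⟩ := pvFind?_range_some hk0find
    have hk0p' : pvTP l k0 = pvTP l m := by simpa using hk0p
    have key : pvP1 l (m + 1) = (pvP1 l m || decide (k0 + 2 ≤ m)) := by
      rw [Bool.eq_iff_iff]
      simp only [Bool.or_eq_true, decide_eq_true_eq, pvP1_iff]
      constructor
      · rintro ⟨k, hk, j', hj', hjk, hpp⟩
        rcases Nat.lt_succ_iff_lt_or_eq.mp hk with hlt | rfl
        · exact Or.inl ⟨k, hlt, j', hj', hjk, hpp⟩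
        · right
          have : ¬ j' < k0 := by
            intro hlt
            have := hk0min j' hlt
            rw [hpp] at this; simp at this
          omega
      · rintro (⟨k, hk, j', hj', hjk, hpp⟩ | hle)
        · exact ⟨k, Nat.lt_succ_of_lt hk, j', hj', hjk, hpp⟩
        · exact ⟨m, Nat.lt_succ_self m, k0, by omega, by omega, hk0p'⟩
    have hcont : d.contains (pvTP l m) = true := by
      cases hcc : d.contains (pvTP l m)
      · rw [(PySem.Dict.get?_eq_none_iff_contains d (pvTP l m)).mpr hcc] at hg; cases hg
      · rfl
    have hstep : pvStepB (d, b) ((m : Int), pvTP l m) =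
        (d, if 2 ≤ (m : Int) - (k0 : Int) then true else b) := by
      unfold pvStepB
      rw [PySem.Dict.setdefault_of_contains d ((m : Int)) hcont]
      simp [hg]
    rw [hstep]
    refine ⟨?_, ?_⟩
    · intro q
      rw [pvFst_succ]
      show d.get? q = _
      rw [hd q]
      by_cases hc : pvTP l m = q
      · subst hc
        have hfstm : pvFst l m (pvTP l m) = some (k0 : Int) := by
          unfold pvFst; rw [hk0find]; rfl
        rw [hfstm]; simp
      · simp [hc]
    · show (if 2 ≤ (m : Int) - (k0 : Int) then true else b) = _
      rw [key, h1]
      by_cases hle : 2 ≤ (m : Int) - (k0 : Int)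
      · rw [if_pos hle]
        have : k0 + 2 ≤ m := by omega
        simp [this]
      · rw [if_neg hle]
        have : ¬ (k0 + 2 ≤ m) := by omega
        simp [this]
  | none =>
    have hspec := hd (pvTP l m)
    rw [hg] at hspec
    have hnone : List.find? (fun k => pvTP l k == pvTP l m) (List.range m) = none := by
      unfold pvFst at hspec
      cases hff : List.find? (fun k => pvTP l k == pvTP l m) (List.range m) with
      | some v => rw [hff] at hspec; simp at hspec
      | none => rfl
    have hnoocc : ∀ k < m, pvTP l k ≠ pvTP l m := by
      intro k hk
      have := List.find?_eq_none.mp hnone k (by simp [hk])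
      simpa using this
    have key : pvP1 l (m + 1) = pvP1 l m := by
      rw [Bool.eq_iff_iff]
      simp only [pvP1_iff]
      constructor
      · rintro ⟨k, hk, j', hj', hjk, hpp⟩
        rcases Nat.lt_succ_iff_lt_or_eq.mp hk with hlt | rfl
        · exact ⟨k, hlt, j', hj', hjk, hpp⟩
        · exact absurd hpp (hnoocc j' hj')
      · rintro ⟨k, hk, j', hj', hjk, hpp⟩
        exact ⟨k, Nat.lt_succ_of_lt hk, j', hj', hjk, hpp⟩
    have hcont : d.contains (pvTP l m) = false :=
      (PySem.Dict.get?_eq_none_iff_contains d (pvTP l m)).mp hg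
    have hstep : pvStepB (d, b) ((m : Int), pvTP l m) =
        (d.insert (pvTP l m) (m : Int), b) := by
      unfold pvStepB
      rw [PySem.Dict.setdefault_of_not_contains d ((m : Int)) hcont]
      simp [hg]
    rw [hstep]
    refine ⟨?_, ?_⟩
    · intro q
      rw [pvFst_succ]
      show (d.insert (pvTP l m) (m : Int)).get? q = _
      rw [PySem.Dict.get?_insert]
      by_cases hc : q = pvTP l m
      · subst hc
        rw [if_pos rfl]
        have hfstm : pvFst l m (pvTP l m) = none := by
          unfold pvFst; rw [hnone]; rfl
        rw [hfstm]; simp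
      · rw [if_neg hc]
        rw [hd q]
        have hc' : ¬ pvTP l m = q := fun h => hc h.symm
        simp [hc']
    · show b = _
      rw [key, h1]

theorem pvFoldB (l : List Char) (m : Nat) :
    (∀ q, (((List.range m).map (fun k : Nat => ((k : Int), pvTP l k))).foldl pvStepB
        (PySem.Dict.empty, false)).1.get? q = pvFst l m q) ∧
    (((List.range m).map (fun k : Nat => ((k : Int), pvTP l k))).foldl pvStepB
        (PySem.Dict.empty, false)).2 = pvP1 l m := by
  induction m with
  | zero =>
    refine ⟨fun q => ?_, by simp [pvP1]⟩
    simp [pvFst, PySem.Dict.get?_empty]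
  | succ m ih =>
    obtain ⟨hd, h1⟩ := ih
    rw [List.range_succ, List.map_append, List.foldl_append]
    simp only [List.map_cons, List.map_nil, List.foldl_cons, List.foldl_nil]
    exact pvStepB_inv l m _ _ hd h1

-- the slice pair written out, for an index with a full pair
theorem pvPair_eq_lit (l : List Char) (k : Nat) (h : k + 1 < l.length) :
    pvPair l k = [l.getD k ' ', l.getD (k + 1) ' '] := by
  apply List.ext_getElem
  · simp [pvPair]; omega
  · intro i h1 h2
    simp only [pvPair, List.length_take, List.length_drop] at h1
    have hi2 : i < 2 := by omega
    interval_cases i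
    · simp [pvPair]
      rw [List.getElem?_eq_getElem (by omega : k < l.length)]; rfl
    · simp [pvPair]
      rw [List.getElem?_eq_getElem h]; rfl

theorem pvPair_tp (l : List Char) (j k : Nat) (hj : j + 1 < l.length) (hk : k + 1 < l.length) :
    pvPair l j = pvPair l k ↔ pvTP l j = pvTP l k := by
  rw [pvPair_eq_lit l j hj, pvPair_eq_lit l k hk]
  unfold pvTP
  constructor
  · intro h; injection h with h1 h2; injection h2 with h2 _; rw [h1, h2]
  · intro h; injection h with h1 h2; rw [h1, h2]

-- pvA1 k in existential form (for k with a full pair)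
theorem pvA1_iff (l : List Char) (k : Nat) (hk : k + 2 ≤ l.length) :
    pvA1 l k = true ↔ ∃ j, pvPair l k = pvPair l (k + 2 + j) := by
  unfold pvA1
  rw [← PySem.Chars.exists_prefix_drop_iff_isIn]
  have hw : (pvPair l k).length = 2 := by
    simp only [pvPair, List.length_take, List.length_drop]; omega
  constructor
  · rintro ⟨j, hj⟩
    refine ⟨j, ?_⟩
    rw [List.prefix_iff_eq_take, hw, List.drop_drop] at hj
    rw [hj]; unfold pvPair; congr 2
  · rintro ⟨j, hj⟩
    refine ⟨j, ?_⟩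
    rw [List.prefix_iff_eq_take, hw, List.drop_drop]
    rw [hj]; unfold pvPair; congr 2

theorem pvAnyA1_eq (l : List Char) :
    (List.range (l.length - 2)).any (pvA1 l) = pvP1 l (l.length - 1) := by
  rw [Bool.eq_iff_iff, List.any_eq_true, pvP1_iff]
  simp only [List.mem_range]
  constructor
  · rintro ⟨k, hk, hA⟩
    rw [pvA1_iff l k (by omega)] at hA
    obtain ⟨j, hj⟩ := hA
    have hlen : (pvPair l (k + 2 + j)).length = 2 := by
      rw [← hj]; simp only [pvPair, List.length_take, List.length_drop]; omega
    have hK : k + 2 + j + 2 ≤ l.length := by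
      simp only [pvPair, List.length_take, List.length_drop] at hlen; omega
    refine ⟨k + 2 + j, by omega, k, by omega, by omega, ?_⟩
    exact (pvPair_tp l k (k + 2 + j) (by omega) (by omega)).mp hj
  · rintro ⟨k, hk, j, hj, hjk, hpp⟩
    refine ⟨j, by omega, ?_⟩
    rw [pvA1_iff l j (by omega)]
    refine ⟨k - j - 2, ?_⟩
    have hk2 : k + 2 ≤ l.length := by omega
    have : pvPair l j = pvPair l k :=
      (pvPair_tp l j k (by omega) (by omega)).mpr hpp
    rw [this]; congr 1; omega

theorem pvZip2_eq (l : List Char) :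
    l.zip (l.drop 2) = (List.range (l.length - 2)).map
      (fun k => (l.getD k ' ', l.getD (k + 2) ' ')) := by
  apply List.ext_getElem
  · simp only [List.length_zip, List.length_map, List.length_range, List.length_drop]; omega
  · intro i h1 h2
    have hi : i + 2 < l.length := by
      simp [List.length_zip] at h1; omega
    simp [List.getElem_zip, Nat.add_comm]
    rw [List.getElem?_eq_getElem (by omega : i < l.length), List.getElem?_eq_getElem hi]
    exact ⟨rfl, rfl⟩

theorem pvAnyA2_eq (l : List Char) :
    (List.range (l.length - 2)).any (pvA2 l) = pvSandwichB l := by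
  unfold pvSandwichB
  rw [pvZip2_eq, List.any_map]
  rfl

theorem pvRangeCast (b : Int) :
    PySem.List.pyRange 0 b 1 = (List.range b.toNat).map (fun k : Nat => (k : Int)) := by
  rw [PySem.List.pyRange_one]
  simp

-- ===== VERDICT (by name: the statement is the Claim_ definition above) =====
theorem is_nice_string_gold_py_spec : Claim_equal_is_nice_string_gold_py := by
  intro line _
  unfold Spec_is_nice_string_gold_py is_nice_string_gold_py is_nice_string_gold_py_alt
  simp only [pvRangeCast, pvZip1_eq, pvEnum_map_range]
  generalize line.toList = l
  have h2 : ((l.length : Int) - 2).toNat = l.length - 2 := by omega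
  rw [h2, pvFoldA]
  obtain ⟨_, hb1⟩ := pvFoldB l (l.length - 1)
  rw [hb1]
  simp only [Bool.false_or]
  rw [pvAnyA1_eq, pvAnyA2_eq]
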